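-- pv_equiv track=rewrite | github.com/myint/isort | isort.py | _output_vertical_grid_common
-- ===== SOURCE A (Python) =====
-- def _output_vertical_grid_common(
--         statement, imports, white_space, indent, line_length):
--     statement += '(\n' + indent + imports.pop(0)
--     while imports:
--         next_import = imports.pop(0)
--         next_statement = '{0}, {1}'.format(statement, next_import)
--         if len(next_statement.split('\n')[-1]) + 1 > line_length:
--             next_statement = '{0},\n{1}{2}'.format(
--                 statement,
--                 indent,
--                 next_import)
--         statement = next_statement
--     return statement
-- ===== SOURCE B (Python) =====
-- def _last_len(prev, s):
--     # length of the last line of <previous text whose last line has length prev> + s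
--     i = s[::-1].find('\n')
--     if i >= 0:
--         return i
--     return prev + len(s)
--
--
-- def _output_vertical_grid_common(statement, imports, white_space, indent, line_length):
--     out = statement + '(\n' + indent + imports[0]
--     cur = _last_len(_last_len(0, indent), imports[0])
--     for next_import in imports[1:]:
--         cand = _last_len(cur + 2, next_import)
--         if cand + 1 > line_length:
--             out += ',\n' + indent + next_import
--             cur = _last_len(_last_len(0, indent), next_import)
--         else:
--             out += ', ' + next_import
--             cur = cand
--     del imports[:]  # A pops every element; keep the observable mutation identical
--     return out
-- ===== Notes on version B (the rewrite author's own statement) =====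
-- stated objective: faster
-- what changed: B tracks the length of the current last line incrementally (updating it from each appended piece via one reverse-find on that piece) instead of re-splitting the whole accumulated statement on '\n' at every iteration, turning the quadratic re-scan into a single linear pass.
import Mathlib
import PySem

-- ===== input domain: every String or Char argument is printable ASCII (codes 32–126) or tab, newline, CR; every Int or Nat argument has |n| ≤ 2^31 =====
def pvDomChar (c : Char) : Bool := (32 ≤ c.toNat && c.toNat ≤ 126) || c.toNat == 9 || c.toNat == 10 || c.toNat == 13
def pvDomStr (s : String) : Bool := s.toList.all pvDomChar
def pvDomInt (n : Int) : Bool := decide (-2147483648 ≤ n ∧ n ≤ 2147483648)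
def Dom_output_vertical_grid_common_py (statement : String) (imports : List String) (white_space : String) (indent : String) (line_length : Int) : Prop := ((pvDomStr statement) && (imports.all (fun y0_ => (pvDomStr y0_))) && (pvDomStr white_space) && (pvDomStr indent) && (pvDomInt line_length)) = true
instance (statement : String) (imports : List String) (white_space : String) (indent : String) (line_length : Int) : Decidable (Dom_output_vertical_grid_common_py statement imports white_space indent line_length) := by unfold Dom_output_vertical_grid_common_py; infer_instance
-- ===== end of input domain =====

-- B replaces A's quadratic re-split of the whole statement at each step by an incrementally
-- maintained last-line length (objective: faster, asymptotic). Both Pythons empty the `imports`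
-- list in place; the equivalence proved here is about the RETURN value.

-- ===== PORT A =====
-- while imports: pop the next import, build the candidate, test the last line of the candidate
def pvGoA (statement : String) (imports : List String) (indent : String) (line_length : Int) : String :=
  match imports with
  | [] => statement
  | next_import :: rest =>
    let next_statement := statement ++ ", " ++ next_import
    -- len(next_statement.split('\n')[-1])
    let last_line := (PySem.List.pyGet? ((PySem.Chars.split? next_statement.toList ['\n']).getD []) (-1)).getD []
    let next_statement := if PySem.Chars.len last_line + 1 > line_length then
        statement ++ ",\n" ++ indent ++ next_import
      else next_statement
    pvGoA next_statement rest indent line_length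

def output_vertical_grid_common_py (statement : String) (imports : List String) (white_space : String) (indent : String) (line_length : Int) : String :=
  match imports with
  | [] => statement  -- Python raises IndexError on imports.pop(0); excluded by Pre_
  | first :: rest => pvGoA (statement ++ "(\n" ++ indent ++ first) rest indent line_length

-- ===== PORT B =====
-- i = s[::-1].find('\n'); return i if i >= 0 else prev + len(s)
def pvLastLen (prev : Int) (s : String) : Int :=
  let i := PySem.Chars.find ((PySem.List.slice? s.toList none none (-1)).getD []) ['\n']
  if 0 ≤ i then i else prev + PySem.Chars.len s.toList

def pvGoB (out : String) (cur : Int) (imports : List String) (indent : String) (line_length : Int) : String :=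
  match imports with
  | [] => out
  | next_import :: rest =>
    let cand := pvLastLen (cur + 2) next_import
    if cand + 1 > line_length then
      pvGoB (out ++ ",\n" ++ indent ++ next_import) (pvLastLen (pvLastLen 0 indent) next_import) rest indent line_length
    else
      pvGoB (out ++ ", " ++ next_import) cand rest indent line_length

def output_vertical_grid_common_py_alt (statement : String) (imports : List String) (white_space : String) (indent : String) (line_length : Int) : String :=
  match imports with
  | [] => statement  -- Python raises IndexError on imports[0]; excluded by Pre_
  | first :: rest =>
    pvGoB (statement ++ "(\n" ++ indent ++ first) (pvLastLen (pvLastLen 0 indent) first) rest indent line_length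

-- ===== PRECONDITION & SPEC =====
-- Pre_ excludes only the empty import list, on which the Python A raises IndexError (pop from empty list).
def Pre_output_vertical_grid_common_py (statement : String) (imports : List String) (white_space : String) (indent : String) (line_length : Int) : Prop := imports ≠ []
instance (statement : String) (imports : List String) (white_space : String) (indent : String) (line_length : Int) : Decidable (Pre_output_vertical_grid_common_py statement imports white_space indent line_length) := by unfold Pre_output_vertical_grid_common_py; infer_instance

def pvWitness_output_vertical_grid_common_py : String × List String × String × String × Int :=
  ("from m import ", ["alpha", "beta", "gamma"], " ", "    ", 20)

def Spec_output_vertical_grid_common_py (statement : String) (imports : List String) (white_space : String) (indent : String) (line_length : Int) (out : String) : Prop := out = output_vertical_grid_common_py_alt statement imports white_space indent line_length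
instance (statement : String) (imports : List String) (white_space : String) (indent : String) (line_length : Int) (out : String) : Decidable (Spec_output_vertical_grid_common_py statement imports white_space indent line_length out) := by unfold Spec_output_vertical_grid_common_py; infer_instance

-- ===== CLAIM (what is proved, stated in full; the proofs are below) =====
def Claim_equal_output_vertical_grid_common_py : Prop := ∀ (statement : String) (imports : List String) (white_space : String) (indent : String) (line_length : Int), Dom_output_vertical_grid_common_py statement imports white_space indent line_length → Pre_output_vertical_grid_common_py statement imports white_space indent line_length → Spec_output_vertical_grid_common_py statement imports white_space indent line_length (output_vertical_grid_common_py statement imports white_space indent line_length)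

-- ===== LEMMAS AND PROOFS =====

-- length of the last line of a character list (chars after the last '\n')
def pvLL (cs : List Char) : Nat := (cs.reverse.takeWhile (fun c => c != '\n')).length

-- the first index of '\n' is the takeWhile length
lemma pv_takeWhile_len (cs : List Char) (k : Nat)
    (hk : (cs.drop k).head? = some '\n') (hmin : ∀ i < k, ¬ (cs.drop i).head? = some '\n') :
    (cs.takeWhile (fun c => c != '\n')).length = k := by
  induction cs generalizing k with
  | nil => simp at hk
  | cons c t ih =>
    cases k with
    | zero =>
      simp at hk
      simp [hk]
    | succ k =>
      have hc : ¬ c = '\n' := by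
        have := hmin 0 (Nat.succ_pos k)
        simpa using this
      have : (t.takeWhile (fun c => c != '\n')).length = k := by
        apply ih
        · simpa using hk
        · intro i hi
          have := hmin (i + 1) (by omega)
          simpa using this
      simp [hc, this]

-- ['\n'] prefix ↔ head is '\n'
lemma pv_singleton_prefix (l : List Char) : ['\n'] <+: l ↔ l.head? = some '\n' := by
  cases l with
  | nil => simp
  | cons c t => simp [List.cons_prefix_iff]

-- PySem find of '\n' characterised
lemma pv_find_newline (cs : List Char) :
    PySem.Chars.find cs ['\n'] =
      if '\n' ∈ cs then ((cs.takeWhile (fun c => c != '\n')).length : Int) else -1 := by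
  by_cases hm : '\n' ∈ cs
  · have hinf : ['\n'] <:+: cs := (List.singleton_infix_iff _ _).2 hm
    have h0 : 0 ≤ PySem.Chars.find cs ['\n'] := (PySem.Chars.find_nonneg_iff _ _).2 hinf
    obtain ⟨hpre, hmin⟩ := PySem.Chars.find_spec h0
    have hk : (cs.takeWhile (fun c => c != '\n')).length = (PySem.Chars.find cs ['\n']).toNat := by
      apply pv_takeWhile_len
      · exact (pv_singleton_prefix _).1 hpre
      · intro i hi h
        exact hmin i hi ((pv_singleton_prefix _).2 h)
    rw [if_pos hm, hk]
    omega
  · rw [if_neg hm, (PySem.Chars.find_eq_neg_one_iff _ _)]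
    intro h
    exact hm ((List.singleton_infix_iff _ _).1 h)

-- pvLastLen computes the last-line length of prev-text ++ s
lemma pv_lastLen_eq (prev : Int) (s : String) :
    pvLastLen prev s = if '\n' ∈ s.toList then (pvLL s.toList : Int) else prev + s.toList.length := by
  unfold pvLastLen
  rw [PySem.List.slice?_none_none_neg_one]
  simp only [Option.getD_some]
  rw [pv_find_newline]
  by_cases hm : '\n' ∈ s.toList
  · have hm' : '\n' ∈ s.toList.reverse := by simpa using hm
    rw [if_pos hm', if_pos hm]
    simp [pvLL]
  · have hm' : '\n' ∉ s.toList.reverse := by simpa using hm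
    rw [if_neg hm', if_neg hm]
    simp [PySem.Chars.len_eq]

-- last-line length of an append
lemma pv_LL_append (a b : List Char) :
    pvLL (a ++ b) = if '\n' ∈ b then pvLL b else pvLL a + b.length := by
  unfold pvLL
  rw [List.reverse_append, List.takeWhile_append]
  by_cases hm : '\n' ∈ b
  · have hne : ¬ (List.takeWhile (fun c => c != '\n') b.reverse).length = b.reverse.length := by
      intro h
      have h2 := List.Sublist.eq_of_length (List.takeWhile_sublist _) h
      have := List.takeWhile_eq_self_iff.1 h2 '\n' (by simpa using hm)
      simp at this
    rw [if_neg hne, if_pos hm]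
  · have hall : ∀ x ∈ b.reverse, (fun c => c != '\n') x = true := by
      intro x hx
      simp only [List.mem_reverse] at hx
      simp only [bne_iff_ne, ne_eq]
      rintro rfl
      exact hm hx
    have heq : List.takeWhile (fun c => c != '\n') b.reverse = b.reverse := List.takeWhile_eq_self_iff.2 hall
    rw [heq, if_pos rfl, if_neg hm]
    simp [Nat.add_comm]

-- the last line itself (as a character list)
def pvLP (cs : List Char) : List Char := (cs.reverse.takeWhile (fun c => c != '\n')).reverse

lemma pv_LL_eq_length (cs : List Char) : pvLL cs = (pvLP cs).length := by
  simp [pvLL, pvLP]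

lemma pv_lp_nonl (cur : List Char) (hc : '\n' ∉ cur) : pvLP cur.reverse = cur.reverse := by
  unfold pvLP
  rw [List.reverse_reverse, List.takeWhile_eq_self_iff.2 ?_]
  intro x hx
  simp only [bne_iff_ne, ne_eq]
  rintro rfl
  exact hc hx

lemma pv_lp_append_nl (a b : List Char) : pvLP (a ++ '\n' :: b) = pvLP b := by
  unfold pvLP
  rw [show (a ++ '\n' :: b).reverse = b.reverse ++ '\n' :: a.reverse by simp]
  rw [List.takeWhile_append]
  split_ifs with h
  · rw [List.Sublist.eq_of_length (List.takeWhile_sublist _) h]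
    simp
  · rfl

-- splitOn.go: the last piece is the text after the last '\n'
lemma pv_go_last (fuel : Nat) :
    ∀ (l cur : List Char) (accs : List (List Char)), l.length ≤ fuel → '\n' ∉ cur →
      (PySem.Chars.splitOn.go ['\n'] fuel l cur accs).getLast? =
        some (pvLP (cur.reverse ++ l)) := by
  induction fuel with
  | zero =>
    intro l cur accs hl hc
    have : l = [] := List.eq_nil_of_length_eq_zero (Nat.le_zero.1 hl)
    subst this
    simp only [PySem.Chars.splitOn.go]
    rw [List.getLast?_reverse]
    simp [pv_lp_nonl cur hc]
  | succ fuel ih =>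
    intro l cur accs hl hc
    cases l with
    | nil =>
      simp only [PySem.Chars.splitOn.go]
      rw [List.getLast?_reverse]
      simp [pv_lp_nonl cur hc]
    | cons c rest =>
      simp only [PySem.Chars.splitOn.go]
      by_cases hcn : c = '\n'
      · subst hcn
        rw [if_pos (by simp [List.isPrefixOf])]
        have := ih (List.drop ['\n'].length ('\n' :: rest)) [] (cur.reverse :: accs)
          (by simpa using hl) (by simp)
        rw [this]
        simp [pv_lp_append_nl]
      · rw [if_neg (by simp [List.isPrefixOf]; exact fun h => hcn h.symm)]
        have := ih rest (c :: cur) accs (by simpa using hl)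
          (by simp only [List.mem_cons]; push_neg; exact ⟨fun h => hcn h.symm, hc⟩)
        rw [this]
        simp

-- pyGet? at -1 is getLast?
lemma pv_pyGet_neg_one {α : Type} (l : List α) : PySem.List.pyGet? l (-1) = l.getLast? := by
  cases l with
  | nil => simp [PySem.List.pyGet?, PySem.List.pyIdx?]
  | cons a t =>
    have h1 : (-(↑(a :: t).length) : Int) ≤ -1 := by
      simp only [List.length_cons]
      omega
    simp only [PySem.List.pyGet?, PySem.List.pyIdx?]
    rw [if_neg (by omega), if_pos h1]
    simp [List.getLast?_eq_getElem?]

-- the A-side last-line expression equals pvLP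
lemma pv_splitOn_last (cs : List Char) :
    (PySem.List.pyGet? ((PySem.Chars.split? cs ['\n']).getD []) (-1)).getD [] = pvLP cs := by
  have hs : PySem.Chars.split? cs ['\n'] = some (PySem.Chars.splitOn cs ['\n']) := by
    simp [PySem.Chars.split?]
  rw [hs, Option.getD_some, pv_pyGet_neg_one]
  have := pv_go_last (cs.length + 1) cs [] [] (by omega) (by simp)
  unfold PySem.Chars.splitOn
  simp only [List.reverse_nil, List.nil_append] at this
  rw [this, Option.getD_some]

-- the A-side candidate length in terms of B's incremental update
lemma pv_cand_eq (acc imp : String) (cur : Int) (hcur : cur = (pvLL acc.toList : Int)) :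
    (pvLL ((acc ++ ", " ++ imp).toList) : Int) = pvLastLen (cur + 2) imp := by
  rw [pv_lastLen_eq, show ((acc ++ ", " ++ imp).toList) = (acc.toList ++ ", ".toList) ++ imp.toList by
    simp [String.toList_append], pv_LL_append, pv_LL_append]
  have h2 : '\n' ∉ ", ".toList := by decide
  rw [if_neg h2]
  subst hcur
  split_ifs with h
  · rfl
  · have h2l : ([',', ' '] : List Char).length = 2 := rfl
    push_cast [h2l]
    omega

-- the common "text ++ <line-ending separator> ++ indent ++ import" last-line length
lemma pv_LL_block (acc : String) (sep : List Char) (hmem : '\n' ∈ sep) (hLL : pvLL sep = 0)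
    (ind imp : String) :
    (pvLL (acc.toList ++ sep ++ ind.toList ++ imp.toList) : Int) = pvLastLen (pvLastLen 0 ind) imp := by
  rw [pv_lastLen_eq, pv_lastLen_eq]
  rw [show acc.toList ++ sep ++ ind.toList ++ imp.toList
      = ((acc.toList ++ sep) ++ ind.toList) ++ imp.toList by simp [List.append_assoc]]
  rw [pv_LL_append, pv_LL_append, pv_LL_append, if_pos hmem, hLL]
  split_ifs with h1 h2 <;> push_cast <;> omega

-- main loop invariant: B's cur is always the last-line length of A's statement
lemma pv_loop_eq (ind : String) (L : Int) :
    ∀ (rest : List String) (acc : String) (cur : Int), cur = (pvLL acc.toList : Int) →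
      pvGoA acc rest ind L = pvGoB acc cur rest ind L := by
  intro rest
  induction rest with
  | nil => intro acc cur hcur; rfl
  | cons imp rest ih =>
    intro acc cur hcur
    simp only [pvGoA, pvGoB]
    rw [pv_splitOn_last]
    have hlen : PySem.Chars.len (pvLP ((acc ++ ", " ++ imp).toList)) = pvLastLen (cur + 2) imp := by
      rw [PySem.Chars.len_eq, ← pv_LL_eq_length, pv_cand_eq acc imp cur hcur]
    rw [hlen]
    by_cases hcond : pvLastLen (cur + 2) imp + 1 > L
    · rw [if_pos hcond, if_pos hcond]
      apply ih
      rw [show ((acc ++ ",\n" ++ ind ++ imp).toList)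
          = acc.toList ++ ",\n".toList ++ ind.toList ++ imp.toList by simp [String.toList_append]]
      rw [pv_LL_block acc (",\n".toList) (by decide) (by decide) ind imp]
    · rw [if_neg hcond, if_neg hcond]
      apply ih
      rw [← pv_cand_eq acc imp cur hcur]

-- ===== VERDICT (by name: the statement is the Claim_ definition above) =====
theorem output_vertical_grid_common_py_spec : Claim_equal_output_vertical_grid_common_py := by
  intro statement imports white_space indent line_length _ hpre
  unfold Spec_output_vertical_grid_common_py
  match imports with
  | [] => exact absurd rfl hpre
  | first :: rest =>
    show pvGoA _ _ _ _ = _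
    unfold output_vertical_grid_common_py_alt
    rw [pv_loop_eq indent line_length rest (statement ++ "(\n" ++ indent ++ first)
      (pvLastLen (pvLastLen 0 indent) first) ?_]
    rw [← pv_LL_block statement ("(\n".toList) (by decide) (by decide) indent first]
    congr 1
    simp [String.toList_append]
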